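-- pv_equiv track=rewrite | github.com/tomhallmain/simple_image_compare | compare.py | is_any_x_true_consecutive
-- ===== SOURCE A (Python) =====
-- def is_any_x_true_consecutive(bool_list, x_threshold):
--     '''
--     Given a list of boolean values, return 1 (true) only if at least
--     x_threshold of them are consecutively true.
--     '''
--     count_true = 1
--     prior_bool = False
--     consecutive_count_true = 1
--     consecutive_runs_true = 0
--     consecutive_threshold = 10
--     consecutive_run_threshold = 10
--
--     for _bool in bool_list:
--         if _bool:
--             count_true += 1
--             if prior_bool:
--                 consecutive_count_true += 1
--                 if consecutive_count_true > consecutive_threshold: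
--                     consecutive_runs_true += 1
--         prior_bool = _bool
--         if (count_true > x_threshold
--                 and consecutive_runs_true > consecutive_run_threshold):
--             return 1
--
--     return 0
-- ===== SOURCE B (Python) =====
-- def is_any_x_true_consecutive(bool_list, x_threshold):
--     '''
--     Given a list of boolean values, return 1 (true) only if at least
--     x_threshold of them are consecutively true.
--     '''
--     total = sum(1 for b in bool_list if b)
--     pairs = sum(1 for a, b in zip(bool_list, bool_list[1:]) if a and b)
--     return 1 if total + 1 > x_threshold and pairs > 19 else 0
-- ===== Notes on version B (the rewrite author's own statement) =====
-- stated objective: simpler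
-- what changed: Replaces A's stateful early-exit loop over four mutable counters with two closed-form counts (number of trues, number of adjacent true pairs) and one final comparison, using that A's counters are monotone so the mid-loop early return is redundant.
import Mathlib
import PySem

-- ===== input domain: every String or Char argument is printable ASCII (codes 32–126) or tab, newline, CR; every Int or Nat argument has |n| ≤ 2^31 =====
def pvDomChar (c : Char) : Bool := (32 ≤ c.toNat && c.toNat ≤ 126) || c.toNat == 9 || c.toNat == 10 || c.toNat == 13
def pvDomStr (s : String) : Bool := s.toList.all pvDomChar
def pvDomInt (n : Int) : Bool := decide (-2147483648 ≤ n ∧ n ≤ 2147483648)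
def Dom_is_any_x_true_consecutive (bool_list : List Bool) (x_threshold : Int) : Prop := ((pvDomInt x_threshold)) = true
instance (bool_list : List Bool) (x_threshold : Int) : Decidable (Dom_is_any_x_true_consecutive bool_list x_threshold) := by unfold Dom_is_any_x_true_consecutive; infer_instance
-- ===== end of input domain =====

-- B replaces A's stateful early-exit loop (four mutable counters) with two closed-form
-- counts and one final comparison (objective: simpler); return values agree on all inputs.

-- ===== PORT A =====
-- the for-loop of A, with its mutable state (count_true, prior_bool,
-- consecutive_count_true, consecutive_runs_true) as parameters; the early `return 1`
-- becomes the non-recursive branch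
def pvLoopA (xt : Int) : List Bool → Int → Bool → Int → Int → Int
  | [], _, _, _, _ => 0
  | b :: rest, ct, prior, cct, crt =>
    let ct := if b then ct + 1 else ct
    let cct := if b && prior then cct + 1 else cct
    let crt := if b && prior && decide (cct > 10) then crt + 1 else crt
    if ct > xt ∧ crt > 10 then 1 else pvLoopA xt rest ct b cct crt

def is_any_x_true_consecutive (bool_list : List Bool) (x_threshold : Int) : Int :=
  pvLoopA x_threshold bool_list 1 false 1 0

-- ===== PORT B =====
def is_any_x_true_consecutive_alt (bool_list : List Bool) (x_threshold : Int) : Int :=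
  let total : Int := bool_list.foldl (fun acc b => if b then acc + 1 else acc) 0
  let pairs : Int := (bool_list.zip (bool_list.drop 1)).foldl
      (fun acc p => if p.1 && p.2 then acc + 1 else acc) 0
  if total + 1 > x_threshold ∧ pairs > 19 then 1 else 0

-- ===== PRECONDITION & SPEC =====
def Spec_is_any_x_true_consecutive (bool_list : List Bool) (x_threshold : Int) (out : Int) : Prop := out = is_any_x_true_consecutive_alt bool_list x_threshold
instance (bool_list : List Bool) (x_threshold : Int) (out : Int) : Decidable (Spec_is_any_x_true_consecutive bool_list x_threshold out) := by unfold Spec_is_any_x_true_consecutive; infer_instance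

-- ===== CLAIM (what is proved, stated in full; the proofs are below) =====
def Claim_equal_is_any_x_true_consecutive : Prop := ∀ (bool_list : List Bool) (x_threshold : Int), Dom_is_any_x_true_consecutive bool_list x_threshold → Spec_is_any_x_true_consecutive bool_list x_threshold (is_any_x_true_consecutive bool_list x_threshold)

-- ===== LEMMAS AND PROOFS =====

-- number of true elements of a list
def pvTotal : List Bool → Int
  | [] => 0
  | b :: rest => (if b then 1 else 0) + pvTotal rest

-- number of adjacent true pairs, given the element preceding the list
def pvPairs : Bool → List Bool → Int
  | _, [] => 0
  | prior, b :: rest => (if b && prior then 1 else 0) + pvPairs b rest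

theorem pvTotal_nonneg : ∀ l : List Bool, 0 ≤ pvTotal l := by
  intro l; induction l with
  | nil => simp [pvTotal]
  | cons b rest ih => simp only [pvTotal]; split <;> omega

theorem pvPairs_nonneg : ∀ (p : Bool) (l : List Bool), 0 ≤ pvPairs p l := by
  intro p l; induction l generalizing p with
  | nil => simp [pvPairs]
  | cons b rest ih => simp only [pvPairs]; have := ih b; split <;> omega

-- the early-exit loop of A equals a closed-form condition on the final counters
theorem pvLoopA_closed (xt : Int) :
    ∀ (l : List Bool) (ct : Int) (prior : Bool) (cct crt : Int),
      crt = max 0 (cct - 10) → ¬ (ct > xt ∧ crt > 10) →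
      pvLoopA xt l ct prior cct crt =
        if ct + pvTotal l > xt ∧ cct + pvPairs prior l > 20 then 1 else 0 := by
  intro l
  induction l with
  | nil =>
    intro ct prior cct crt hinv hno
    simp only [pvLoopA, pvTotal, pvPairs, add_zero]
    rw [if_neg]; omega
  | cons b rest ih =>
    intro ct prior cct crt hinv hno
    have htot := pvTotal_nonneg rest
    have hpF := pvPairs_nonneg b rest
    cases b <;> cases prior <;>
        simp only [pvLoopA, pvTotal, pvPairs, Bool.and_self, Bool.and_false, Bool.and_true,
          Bool.false_and, Bool.true_and, Bool.false_eq_true, if_false, if_true,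
          decide_eq_true_eq, zero_add]
    · rw [if_neg hno, ih ct false cct crt hinv hno]
    · rw [if_neg hno, ih ct false cct crt hinv hno]
    · by_cases hret : ct + 1 > xt ∧ crt > 10
      · rw [if_pos hret, if_pos (by omega)]
      · rw [if_neg hret, ih (ct + 1) true cct crt hinv hret]
        exact if_congr (by omega) rfl rfl
    · have hinv1 : (if cct + 1 > 10 then crt + 1 else crt) = max 0 (cct + 1 - 10) := by
        split <;> omega
      by_cases hret : ct + 1 > xt ∧ (if cct + 1 > 10 then crt + 1 else crt) > 10
      · rw [if_pos hret, if_pos (by rw [hinv1] at hret; omega)]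
      · rw [if_neg hret, ih (ct + 1) true (cct + 1) _ hinv1 hret]
        exact if_congr (by omega) rfl rfl

-- B's first fold counts the trues
theorem pvFold_total : ∀ (l : List Bool) (acc : Int),
    l.foldl (fun acc b => if b then acc + 1 else acc) acc = acc + pvTotal l := by
  intro l
  induction l with
  | nil => intro acc; simp [pvTotal]
  | cons b rest ih =>
    intro acc
    rw [List.foldl_cons, ih]
    cases b <;> simp [pvTotal] <;> omega

-- B's second fold, over the zip of a list with its tail, counts the adjacent true pairs
theorem pvFold_pairs : ∀ (l : List Bool) (prior : Bool) (acc : Int),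
    ((prior :: l).zip l).foldl (fun acc p => if p.1 && p.2 then acc + 1 else acc) acc
      = acc + pvPairs prior l := by
  intro l
  induction l with
  | nil => intro prior acc; simp [pvPairs]
  | cons b rest ih =>
    intro prior acc
    have hz : (prior :: b :: rest).zip (b :: rest) = (prior, b) :: ((b :: rest).zip rest) := rfl
    rw [hz, List.foldl_cons, ih]
    cases prior <;> cases b <;> simp [pvPairs] <;> omega

-- ===== VERDICT (by name: the statement is the Claim_ definition above) =====
theorem is_any_x_true_consecutive_spec : Claim_equal_is_any_x_true_consecutive := by
  intro l xt _
  unfold Spec_is_any_x_true_consecutive is_any_x_true_consecutive is_any_x_true_consecutive_alt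
  rw [pvLoopA_closed xt l 1 false 1 0 (by omega) (by omega), pvFold_total]
  cases l with
  | nil => norm_num [pvTotal, pvPairs]
  | cons b rest =>
    simp only [List.drop_one, List.tail_cons, pvFold_pairs rest b 0, zero_add]
    have h2 := pvPairs_nonneg b rest
    have hh : pvPairs false (b :: rest) = pvPairs b rest := by
      cases b <;> simp [pvPairs]
    rw [hh]
    exact if_congr (by omega) rfl rfl
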